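-- pv_equiv track=rewrite | github.com/julianliu17/Diagonal-Sudoku | Solver_Generator.py | solve
-- ===== SOURCE A (Python) =====
-- def find_empty(board):
--     for y in range(len(board)):  # Going through each row
--         for x in range(len(board[0])):  # Going through each column
--             if board[y][x] == 0:  # Find empty cells
--                 return (y, x)  # Return row,column
--     return None
--
-- def is_valid(board, num, pos):  # num = number being evaluated on empty cell, pos = (row,column)
--
--     # Check each value along row at row y
--     for i in range(len(board[0])):
--         if board[pos[0]][i] == num and pos[1] != i:
--             return False
--
--     # Check each value along column at column x
--     for i in range(len(board)):
--         if board[i][pos[1]] == num and pos[0] != i: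
--             return False
--
--     left_to_right_diag = [(0, 0), (1, 1), (2, 2), (3, 3), (4, 4), (5, 5), (6, 6),
--                           # Could also use range to generate diag coordinates for boards bigger than 9x9
--                           (7, 7), (8, 8)]
--     right_to_left_diag = [(0, 8), (1, 7), (2, 6), (3, 5), (4, 4), (5, 3), (6, 2),
--                           (7, 1), (8, 0)]
--
--     # Check left to right diagonal
--     if pos in left_to_right_diag:
--         for i in range(len(left_to_right_diag)):
--             if board[left_to_right_diag[i][0]][left_to_right_diag[i][1]] == num and pos != left_to_right_diag[i]:
--                 return False
--
--     # Check right to left diagonal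
--     if pos in right_to_left_diag:
--         for i in range(len(right_to_left_diag)):
--             if board[right_to_left_diag[i][0]][right_to_left_diag[i][1]] == num and pos != right_to_left_diag[i]:
--                 return False
--
--     # Check box
--     box_x = pos[1] // 3
--     box_y = pos[0] // 3
--
--     for i in range(box_y * 3, box_y * 3 + 3):  # Find row
--         for j in range(box_x * 3, box_x * 3 + 3):  # Find column
--             if board[i][j] == num and (
--                     i, j) != pos:  # Find numbers excluding current filled in position of testing number
--                 return False
--
--     return True
--
-- def solve(board):
--     empty_cell = find_empty(board)
--     if not empty_cell:
--         return True
--     else: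
--         row, col = empty_cell
--
--     for i in range(1, len(board) + 1):
--         if is_valid(board, i, (row, col)):
--             board[row][col] = i
--             if solve(board):
--                 return True
--             board[row][col] = 0
--     return False
-- ===== SOURCE B (Python) =====
-- def solve(board):
--     # Index-structure backtracker: one pass builds candidate-blocking sets for every
--     # row/column/box/diagonal; the search then never rescans the board -- validity is
--     # O(1) set membership, maintained incrementally on place/undo.  Same first-empty,
--     # 1..9 search order as the original, hence the same result.
--     empties = [(y, x) for y in range(len(board)) for x in range(len(board[0])) if board[y][x] == 0]
--     if not empties:
--         return True
--     rows = [{board[y][x] for x in range(9) if board[y][x]} for y in range(9)]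
--     cols = [{board[y][x] for y in range(9) if board[y][x]} for x in range(9)]
--     boxes = [{board[3 * (b // 3) + i][3 * (b % 3) + j] for i in range(3) for j in range(3)
--               if board[3 * (b // 3) + i][3 * (b % 3) + j]} for b in range(9)]
--     d1 = {board[i][i] for i in range(9) if board[i][i]}
--     d2 = {board[i][8 - i] for i in range(9) if board[i][8 - i]}
--
--     def go(k):
--         if k == len(empties):
--             return True
--         y, x = empties[k]
--         bi = 3 * (y // 3) + x // 3
--         for v in range(1, 10):
--             if v in rows[y] or v in cols[x] or v in boxes[bi] \
--                or (y == x and v in d1) or (y + x == 8 and v in d2):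
--                 continue
--             rows[y].add(v); cols[x].add(v); boxes[bi].add(v)
--             if y == x:
--                 d1.add(v)
--             if y + x == 8:
--                 d2.add(v)
--             board[y][x] = v
--             if go(k + 1):
--                 return True
--             board[y][x] = 0
--             rows[y].discard(v); cols[x].discard(v); boxes[bi].discard(v)
--             if y == x:
--                 d1.discard(v)
--             if y + x == 8:
--                 d2.discard(v)
--         return False
--
--     return go(0)
-- ===== Notes on version B (the rewrite author's own statement) =====
-- stated objective: alternative
-- what changed: Same first-empty/1..9 search order, but B builds blocking sets for every row, column, box and both diagonals once (by comprehensions) and maintains them incrementally on place/undo, so each validity test is O(1) set membership and the board is never rescanned during the search, replacing A's per-node find_empty rescan and four exclusion-scan loops over hardcoded coordinate lists.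
-- outside the precondition, e.g. on solve([[0, 1, 2]]): A returns False, B raises IndexError
import Mathlib
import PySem

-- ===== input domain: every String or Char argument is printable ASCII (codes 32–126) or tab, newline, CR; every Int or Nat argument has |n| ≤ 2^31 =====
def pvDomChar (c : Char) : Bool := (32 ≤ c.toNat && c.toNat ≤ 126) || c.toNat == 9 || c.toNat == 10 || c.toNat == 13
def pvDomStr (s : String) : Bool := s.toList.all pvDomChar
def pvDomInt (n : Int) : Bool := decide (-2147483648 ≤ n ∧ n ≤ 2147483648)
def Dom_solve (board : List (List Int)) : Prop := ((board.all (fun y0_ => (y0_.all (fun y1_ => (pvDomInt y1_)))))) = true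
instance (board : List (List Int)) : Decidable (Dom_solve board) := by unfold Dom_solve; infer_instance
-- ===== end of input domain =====

-- B replaces A's per-node board rescans (row/column/diagonal/box exclusion loops run
-- at every search node) by blocking SETS for each row, column, box and diagonal, built
-- once and maintained incrementally on place/undo, so each validity test is a set
-- membership (objective: alternative/constant-factor).  Both Pythons mutate `board` in
-- place; the equivalence proved here is about the RETURN value only (the ports are pure).

-- ===== PORT A =====
-- board[y][x] ; y, x always come from in-range scans under Pre_, so the defaults never fire
def pvCell (b : List (List Int)) (y x : Int) : Int :=
  PySem.List.pyGetD (PySem.List.pyGetD b y []) x 0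

-- board[y][x] = v  (y, x are in range and nonnegative wherever the ports use this)
def pvSet (b : List (List Int)) (y x v : Int) : List (List Int) :=
  b.set y.toNat ((PySem.List.pyGetD b y []).set x.toNat v)

def findEmpty (b : List (List Int)) : Option (Int × Int) :=
  (PySem.List.pyRange 0 (b.length : Int) 1).findSome? (fun y =>
    ((PySem.List.pyRange 0 ((PySem.List.pyGetD b 0 []).length : Int) 1).find?
        (fun x => pvCell b y x == 0)).map (fun x => (y, x)))

def pvLtr : List (Int × Int) := [(0,0),(1,1),(2,2),(3,3),(4,4),(5,5),(6,6),(7,7),(8,8)]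
def pvRtl : List (Int × Int) := [(0,8),(1,7),(2,6),(3,5),(4,4),(5,3),(6,2),(7,1),(8,0)]

def isValid (b : List (List Int)) (num r c : Int) : Bool :=
  let rowBad := (PySem.List.pyRange 0 ((PySem.List.pyGetD b 0 []).length : Int) 1).any
      (fun i => pvCell b r i == num && !(c == i))
  let colBad := (PySem.List.pyRange 0 (b.length : Int) 1).any
      (fun i => pvCell b i c == num && !(r == i))
  let d1Bad := pvLtr.contains (r, c) &&
      (PySem.List.pyRange 0 (pvLtr.length : Int) 1).any (fun i =>
        pvCell b (PySem.List.pyGetD pvLtr i (0,0)).1 (PySem.List.pyGetD pvLtr i (0,0)).2 == num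
          && !((r, c) == PySem.List.pyGetD pvLtr i (0,0)))
  let d2Bad := pvRtl.contains (r, c) &&
      (PySem.List.pyRange 0 (pvRtl.length : Int) 1).any (fun i =>
        pvCell b (PySem.List.pyGetD pvRtl i (0,0)).1 (PySem.List.pyGetD pvRtl i (0,0)).2 == num
          && !((r, c) == PySem.List.pyGetD pvRtl i (0,0)))
  let boxX := PySem.Int.floordiv c 3
  let boxY := PySem.Int.floordiv r 3
  let boxBad := (PySem.List.pyRange (boxY * 3) (boxY * 3 + 3) 1).any (fun i =>
    (PySem.List.pyRange (boxX * 3) (boxX * 3 + 3) 1).any (fun j =>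
      pvCell b i j == num && !((i, j) == (r, c))))
  !rowBad && !colBad && !d1Bad && !d2Bad && !boxBad

mutual
-- fuel: each recursive call fills one empty cell, so 82 > 81 suffices on any 9×9 board;
-- the fuel-0 branch is unreachable under Pre_.
def solveFuel : Nat → List (List Int) → Bool
  | 0, _ => false
  | fuel + 1, b =>
    match findEmpty b with
    | none => true
    | some (r, c) => tryA fuel b r c (PySem.List.pyRange 1 ((b.length : Int) + 1) 1)
termination_by fuel b => (fuel, 0)

def tryA : Nat → List (List Int) → Int → Int → List Int → Bool
  | _, _, _, _, [] => false
  | fuel, b, r, c, n :: ns =>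
    if isValid b n r c then
      if solveFuel fuel (pvSet b r c n) then true
      else tryA fuel (pvSet (pvSet b r c n) r c 0) r c ns
    else tryA fuel b r c ns
termination_by fuel b r c ns => (fuel, ns.length + 1)
end

def solve (board : List (List Int)) : Bool := solveFuel 82 board

-- ===== PORT B =====
-- [(y, x) for y in range(len(board)) for x in range(len(board[0])) if board[y][x] == 0]
def pvEmpties (b : List (List Int)) : List (Int × Int) :=
  (PySem.List.pyRange 0 (b.length : Int) 1).flatMap (fun y =>
    ((PySem.List.pyRange 0 ((PySem.List.pyGetD b 0 []).length : Int) 1).filter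
        (fun x => pvCell b y x == 0)).map (fun x => (y, x)))

-- rows = [{board[y][x] for x in range(9) if board[y][x]} for y in range(9)]
def pvRowsInit (b : List (List Int)) : List (PySem.Set Int) :=
  (PySem.List.pyRange 0 9 1).map (fun y =>
    PySem.Set.ofList (((PySem.List.pyRange 0 9 1).filter
        (fun x => !(pvCell b y x == 0))).map (fun x => pvCell b y x)))

-- cols = [{board[y][x] for y in range(9) if board[y][x]} for x in range(9)]
def pvColsInit (b : List (List Int)) : List (PySem.Set Int) :=
  (PySem.List.pyRange 0 9 1).map (fun x =>
    PySem.Set.ofList (((PySem.List.pyRange 0 9 1).filter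
        (fun y => !(pvCell b y x == 0))).map (fun y => pvCell b y x)))

-- boxes = [{…} for b in range(9)]: values in the 3×3 block of box index bi
def pvBoxesInit (b : List (List Int)) : List (PySem.Set Int) :=
  (PySem.List.pyRange 0 9 1).map (fun bi =>
    PySem.Set.ofList ((((PySem.List.pyRange 0 3 1).flatMap (fun i =>
        (PySem.List.pyRange 0 3 1).map (fun j =>
          (3 * PySem.Int.floordiv bi 3 + i, 3 * PySem.Int.mod bi 3 + j)))).filter
      (fun p => !(pvCell b p.1 p.2 == 0))).map (fun p => pvCell b p.1 p.2)))

def pvD1Init (b : List (List Int)) : PySem.Set Int :=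
  PySem.Set.ofList (((PySem.List.pyRange 0 9 1).filter
      (fun i => !(pvCell b i i == 0))).map (fun i => pvCell b i i))

def pvD2Init (b : List (List Int)) : PySem.Set Int :=
  PySem.Set.ofList (((PySem.List.pyRange 0 9 1).filter
      (fun i => !(pvCell b i (8 - i) == 0))).map (fun i => pvCell b i (8 - i)))

-- rows[y] (y is 0 ≤ y < 9 wherever used, so the default never fires)
def pvSetAt (ms : List (PySem.Set Int)) (y : Int) : PySem.Set Int :=
  PySem.List.pyGetD ms y PySem.Set.empty

-- rows[y].add(v) / .discard(v), functionally
def pvMaskAdd (ms : List (PySem.Set Int)) (y v : Int) : List (PySem.Set Int) :=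
  PySem.List.pySetD ms y (PySem.Set.add (pvSetAt ms y) v)
def pvMaskDel (ms : List (PySem.Set Int)) (y v : Int) : List (PySem.Set Int) :=
  PySem.List.pySetD ms y (PySem.Set.discard (pvSetAt ms y) v)

mutual
def goB : List (List Int) → List (Int × Int) → List (PySem.Set Int) → List (PySem.Set Int) →
    List (PySem.Set Int) → PySem.Set Int → PySem.Set Int → Bool
  | _, [], _, _, _, _, _ => true
  | b, (y, x) :: rest, rows, cols, boxes, d1, d2 =>
      tryB b y x rest rows cols boxes d1 d2 (PySem.List.pyRange 1 10 1)
termination_by b es => (es.length, 0)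

def tryB : List (List Int) → Int → Int → List (Int × Int) → List (PySem.Set Int) →
    List (PySem.Set Int) → List (PySem.Set Int) → PySem.Set Int → PySem.Set Int →
    List Int → Bool
  | _, _, _, _, _, _, _, _, _, [] => false
  | b, y, x, rest, rows, cols, boxes, d1, d2, v :: vs =>
    let bi := 3 * PySem.Int.floordiv y 3 + PySem.Int.floordiv x 3
    if (pvSetAt rows y).contains v || (pvSetAt cols x).contains v ||
        (pvSetAt boxes bi).contains v || (y == x && d1.contains v) ||
        (y + x == 8 && d2.contains v) then
      tryB b y x rest rows cols boxes d1 d2 vs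
    else
      let rows' := pvMaskAdd rows y v
      let cols' := pvMaskAdd cols x v
      let boxes' := pvMaskAdd boxes bi v
      let d1' := if y == x then PySem.Set.add d1 v else d1
      let d2' := if y + x == 8 then PySem.Set.add d2 v else d2
      if goB (pvSet b y x v) rest rows' cols' boxes' d1' d2' then true
      else
        tryB (pvSet (pvSet b y x v) y x 0) y x rest
          (pvMaskDel rows' y v) (pvMaskDel cols' x v) (pvMaskDel boxes' bi v)
          (if y == x then PySem.Set.discard d1' v else d1')
          (if y + x == 8 then PySem.Set.discard d2' v else d2') vs
termination_by b y x rest rows cols boxes d1 d2 vs => (rest.length, vs.length + 1)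
end

def solve_alt (board : List (List Int)) : Bool :=
  let es := pvEmpties board
  if es.isEmpty then true
  else goB board es (pvRowsInit board) (pvColsInit board) (pvBoxesInit board)
    (pvD1Init board) (pvD2Init board)

-- ===== PRECONDITION & SPEC =====
def pvIs9x9 (board : List (List Int)) : Prop :=
  board.length = 9 ∧ ∀ row ∈ board, row.length = 9

-- A returns True immediately when its scan finds no empty cell (rows at least as long as
-- row 0, no 0 among the first len(row 0) entries of any row).
def pvNoEmpty (board : List (List Int)) : Prop :=
  ∀ row ∈ board, (board.headD []).length ≤ row.length ∧
    ∀ k : Nat, k < (board.headD []).length → row.getD k 0 ≠ 0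

-- Pre_ admits 9×9 boards and boards A accepts with no empty cell; it excludes the remaining
-- non-9×9 boards: there A's hardcoded 9-cell diagonals and 3×3 box scans raise IndexError
-- on almost every input with an empty cell, and on the few where a row/column conflict
-- rejects every candidate first, A returns False while B (whose index sets are sized for
-- the 9×9 game) raises IndexError — 9×9 is the natural domain of a diagonal-sudoku solver.
def Pre_solve (board : List (List Int)) : Prop :=
  pvIs9x9 board ∨ pvNoEmpty board
instance (board : List (List Int)) : Decidable (Pre_solve board) := by
  unfold Pre_solve pvIs9x9 pvNoEmpty; infer_instance

def pvWitness_solve : List (List Int) :=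
  [[1,0,0,0,0,0,0,0,0],[0,2,0,0,0,0,0,0,0],[0,0,3,0,0,0,0,0,0],
   [0,0,0,4,0,0,0,0,0],[0,0,0,0,5,0,0,0,0],[0,0,0,0,0,6,0,0,0],
   [0,0,0,0,0,0,7,0,0],[0,0,0,0,0,0,0,8,0],[0,0,0,0,0,0,0,0,9]]

def Spec_solve (board : List (List Int)) (out : Bool) : Prop := out = solve_alt board
instance (board : List (List Int)) (out : Bool) : Decidable (Spec_solve board out) := by
  unfold Spec_solve; infer_instance

-- ===== CLAIM (what is proved, stated in full; the proofs are below) =====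
def Claim_equal_solve : Prop :=
  ∀ (board : List (List Int)), Dom_solve board → Pre_solve board → Spec_solve board (solve board)

-- ===== LEMMAS AND PROOFS =====

theorem pvRow_eq {b : List (List Int)} {y : Int} (hb : pvIs9x9 b) (h0 : 0 ≤ y) (h9 : y < 9) :
    PySem.List.pyGetD b y [] = b[y.toNat]'(by have := hb.1; omega) := by
  exact PySem.List.pyGetD_eq_getElem b [] h0 (by have := hb.1; exact_mod_cast by omega)

theorem pvRow_len {b : List (List Int)} {y : Int} (hb : pvIs9x9 b) (h0 : 0 ≤ y) (h9 : y < 9) :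
    (PySem.List.pyGetD b y []).length = 9 := by
  rw [pvRow_eq hb h0 h9]
  exact hb.2 _ (List.getElem_mem _)

theorem pvCell_eq {b : List (List Int)} {y x : Int} (hb : pvIs9x9 b)
    (hy0 : 0 ≤ y) (hy9 : y < 9) (hx0 : 0 ≤ x) (hx9 : x < 9) :
    pvCell b y x = (b[y.toNat]'(by have := hb.1; omega))[x.toNat]'(by
      have := hb.2 (b[y.toNat]'(by have := hb.1; omega)) (List.getElem_mem _); omega) := by
  unfold pvCell
  rw [pvRow_eq hb hy0 hy9]
  exact PySem.List.pyGetD_eq_getElem _ 0 hx0 (by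
    have := hb.2 (b[y.toNat]'(by have := hb.1; omega)) (List.getElem_mem _)
    exact_mod_cast by omega)

theorem pvSet_eq {b : List (List Int)} {y x : Int} (v : Int) (hb : pvIs9x9 b)
    (hy0 : 0 ≤ y) (hy9 : y < 9) :
    pvSet b y x v = b.set y.toNat ((b[y.toNat]'(by have := hb.1; omega)).set x.toNat v) := by
  unfold pvSet; rw [pvRow_eq hb hy0 hy9]

theorem pre_pvSet {b : List (List Int)} {y x v : Int} (hb : pvIs9x9 b)
    (hy0 : 0 ≤ y) (hy9 : y < 9) : pvIs9x9 (pvSet b y x v) := by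
  rw [pvSet_eq v hb hy0 hy9]
  constructor
  · simpa using hb.1
  · intro row hrow
    rcases List.mem_or_eq_of_mem_set hrow with h | h
    · exact hb.2 _ h
    · subst h; simp; exact hb.2 _ (List.getElem_mem _)

theorem pvCell_eq' {b : List (List Int)} {y x : Int}
    (hy0 : 0 ≤ y) (hx0 : 0 ≤ x) :
    pvCell b y x = ((b[y.toNat]?.getD []))[x.toNat]?.getD 0 := by
  unfold pvCell
  rw [PySem.List.pyGetD_of_nonneg b [] hy0, PySem.List.pyGetD_of_nonneg _ 0 hx0]
  rfl

theorem pvCell_pvSet {b : List (List Int)} {y x u w v : Int} (hb : pvIs9x9 b)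
    (hy0 : 0 ≤ y) (hy9 : y < 9) (hx0 : 0 ≤ x) (hx9 : x < 9)
    (hu0 : 0 ≤ u) (hw0 : 0 ≤ w) :
    pvCell (pvSet b y x v) u w = if u = y ∧ w = x then v else pvCell b u w := by
  have hylen : y.toNat < b.length := by have := hb.1; omega
  have hrowlen : (b[y.toNat]'hylen).length = 9 := hb.2 _ (List.getElem_mem _)
  have hxlen : x.toNat < (b[y.toNat]'hylen).length := by omega
  rw [pvCell_eq' hu0 hw0, pvCell_eq' hu0 hw0, pvSet_eq v hb hy0 hy9, List.getElem?_set]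
  by_cases hc : u = y ∧ w = x
  · obtain ⟨rfl, rfl⟩ := hc
    simp [hylen, hxlen]
  · rw [if_neg hc]
    by_cases huy : y.toNat = u.toNat
    · have huy' : u = y := by omega
      subst huy'
      have hwx : ¬ x.toNat = w.toNat := fun h => hc ⟨rfl, by omega⟩
      simp [hylen, hwx]
    · rw [if_neg huy]

theorem pvSet_eq' {b : List (List Int)} {y : Int} (x v : Int) (hy0 : 0 ≤ y) :
    pvSet b y x v = b.set y.toNat ((b[y.toNat]?.getD []).set x.toNat v) := by
  unfold pvSet
  rw [PySem.List.pyGetD_of_nonneg b [] hy0]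
  rfl

theorem pvRestore {b : List (List Int)} {y x v : Int} (hb : pvIs9x9 b)
    (hy0 : 0 ≤ y) (hy9 : y < 9) (hx0 : 0 ≤ x) (hx9 : x < 9)
    (h0 : pvCell b y x = 0) :
    pvSet (pvSet b y x v) y x 0 = b := by
  have hylen : y.toNat < b.length := by have := hb.1; omega
  rw [pvSet_eq' x v hy0, pvSet_eq' x 0 hy0]
  rw [List.getElem?_set, if_pos rfl, if_pos hylen, Option.getD_some, List.set_set,
    List.set_set, List.getElem?_eq_getElem hylen, Option.getD_some]
  have hrl : (b[y.toNat]'hylen).length = 9 := hb.2 _ (List.getElem_mem _)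
  have hcv : (b[y.toNat]'hylen)[x.toNat]'(by omega) = 0 := by
    have := pvCell_eq (hb := hb) hy0 hy9 hx0 hx9
    rw [h0] at this; exact this.symm
  rw [← hcv, List.set_getElem_self, List.set_getElem_self]

def pvAllPos : List (Int × Int) :=
  (PySem.List.pyRange 0 9 1).flatMap (fun y => (PySem.List.pyRange 0 9 1).map (fun x => (y, x)))

theorem empties_eq_filter {b : List (List Int)} (hb : pvIs9x9 b) :
    pvEmpties b = pvAllPos.filter (fun p => pvCell b p.1 p.2 == 0) := by
  unfold pvEmpties pvAllPos
  rw [hb.1, pvRow_len (y := 0) hb (by norm_num) (by norm_num)]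
  rw [List.filter_flatMap]
  norm_num
  congr 1; funext y
  rw [List.filter_map]
  rfl

theorem nodup_allPos : pvAllPos.Nodup := by decide
theorem mem_allPos_bounds : ∀ p ∈ pvAllPos, 0 ≤ p.1 ∧ p.1 < 9 ∧ 0 ≤ p.2 ∧ p.2 < 9 := by decide
theorem length_allPos : pvAllPos.length = 81 := by decide

theorem filter_tail_of_head {α : Type} {l : List α} {p q : α → Bool} {e : α} {t : List α}
    (hnd : l.Nodup) (h : l.filter p = e :: t) (hq : ∀ a ∈ l, a ≠ e → q a = p a)
    (hqe : q e = false) : l.filter q = t := by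
  induction l generalizing t with
  | nil => simp at h
  | cons a l ih =>
    rw [List.nodup_cons] at hnd
    by_cases hpa : p a
    · rw [List.filter_cons_of_pos hpa] at h
      injection h with h1 h2
      subst h1
      rw [List.filter_cons_of_neg (by simp [hqe])]
      rw [List.filter_congr (fun x hx => hq x (List.mem_cons_of_mem _ hx)
        (fun hxe => hnd.1 (hxe ▸ hx)))]
      rw [h2]
    · rw [List.filter_cons_of_neg (by simp [hpa])] at h
      have hea : a ≠ e := by
        intro he
        have : e ∈ l.filter p := by rw [h]; exact List.mem_cons_self
        exact hnd.1 (he ▸ List.mem_of_mem_filter this)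
      rw [List.filter_cons_of_neg (by
        rw [hq a List.mem_cons_self hea]; simp [hpa])]
      exact ih hnd.2 h (fun x hx hxe => hq x (List.mem_cons_of_mem _ hx) hxe)

theorem empties_head_facts {b : List (List Int)} {r c : Int} {rest : List (Int × Int)}
    (hb : pvIs9x9 b) (h : pvEmpties b = (r, c) :: rest) :
    0 ≤ r ∧ r < 9 ∧ 0 ≤ c ∧ c < 9 ∧ pvCell b r c = 0 := by
  have hm : (r, c) ∈ pvAllPos.filter (fun p => pvCell b p.1 p.2 == 0) := by
    rw [← empties_eq_filter hb, h]; exact List.mem_cons_self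
  have h1 := List.of_mem_filter hm
  have h2 := mem_allPos_bounds _ (List.mem_of_mem_filter hm)
  simp at h1 h2
  exact ⟨h2.1, h2.2.1, h2.2.2.1, h2.2.2.2, h1⟩

theorem empties_pvSet {b : List (List Int)} {r c v : Int} {rest : List (Int × Int)}
    (hb : pvIs9x9 b) (h : pvEmpties b = (r, c) :: rest) (hv : v ≠ 0) :
    pvEmpties (pvSet b r c v) = rest := by
  obtain ⟨hr0, hr9, hc0, hc9, hcell⟩ := empties_head_facts hb h
  rw [empties_eq_filter (pre_pvSet (x := c) (v := v) hb hr0 hr9)]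
  apply filter_tail_of_head nodup_allPos (by rw [← empties_eq_filter hb]; exact h)
  · intro a ha hane
    obtain ⟨ha10, ha19, ha20, ha29⟩ := mem_allPos_bounds _ ha
    rw [pvCell_pvSet hb hr0 hr9 hc0 hc9 ha10 ha20]
    rw [if_neg (by rintro ⟨h1, h2⟩; exact hane (by rw [Prod.ext_iff]; exact ⟨h1, h2⟩))]
  · rw [pvCell_pvSet hb hr0 hr9 hc0 hc9 hr0 hc0, if_pos ⟨rfl, rfl⟩]
    simp [hv]

theorem findSome?_flatMap_head {α β : Type} (ys : List α) (g : α → List β) :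
    ys.findSome? (fun y => (g y).head?) = (ys.flatMap g).head? := by
  induction ys with
  | nil => rfl
  | cons a ys ih =>
    rw [List.findSome?_cons, List.flatMap_cons, List.head?_append]
    cases hga : (g a).head? <;> simp [ih]

theorem findEmpty_eq {b : List (List Int)} (hb : pvIs9x9 b) :
    findEmpty b = (pvEmpties b).head? := by
  unfold findEmpty pvEmpties
  rw [hb.1, pvRow_len (y := 0) hb (by norm_num) (by norm_num)]
  simp only [← List.head?_filter, ← List.head?_map]
  exact findSome?_flatMap_head _ _

theorem ltr_get : ∀ i : Int, 0 ≤ i → i < 9 → PySem.List.pyGetD pvLtr i (0, 0) = (i, i) := by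
  intro i h1 h2; interval_cases i <;> rfl

theorem rtl_get : ∀ i : Int, 0 ≤ i → i < 9 → PySem.List.pyGetD pvRtl i (0, 0) = (i, 8 - i) := by
  intro i h1 h2; interval_cases i <;> rfl

theorem mem_ltr_iff {r c : Int} (hr0 : 0 ≤ r) (hr9 : r < 9) :
    (r, c) ∈ pvLtr ↔ r = c := by
  simp [pvLtr, Prod.ext_iff]
  omega

theorem mem_rtl_iff {r c : Int} (hr0 : 0 ≤ r) (hr9 : r < 9) :
    (r, c) ∈ pvRtl ↔ r + c = 8 := by
  simp [pvRtl, Prod.ext_iff]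
  omega

theorem mem_row_iff {b : List (List Int)} {n r : Int} (hb : pvIs9x9 b)
    (hr0 : 0 ≤ r) (hr9 : r < 9) :
    n ∈ PySem.List.pyGetD b r [] ↔ ∃ i : Int, (0 ≤ i ∧ i < 9) ∧ pvCell b r i = n := by
  rw [pvRow_eq hb hr0 hr9, List.mem_iff_getElem]
  have hlen : (b[r.toNat]'(by have := hb.1; omega)).length = 9 :=
    hb.2 _ (List.getElem_mem _)
  constructor
  · rintro ⟨k, hk, he⟩
    refine ⟨(k : Int), ⟨by omega, by omega⟩, ?_⟩
    rw [pvCell_eq hb hr0 hr9 (by omega) (by exact_mod_cast by omega)]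
    simpa using he
  · rintro ⟨i, ⟨h1, h2⟩, he⟩
    refine ⟨i.toNat, by omega, ?_⟩
    rw [pvCell_eq hb hr0 hr9 h1 h2] at he
    exact he

-- row + column + box + diagonal peer values (proof-side notion bridging A's scans and
-- B's blocking sets)
def pvPeers (b : List (List Int)) (y x : Int) : List Int :=
  PySem.List.pyGetD b y []
    ++ (PySem.List.pyRange 0 9 1).map (fun i => pvCell b i x)
    ++ (PySem.List.pyRange (y - PySem.Int.mod y 3) (y - PySem.Int.mod y 3 + 3) 1).flatMap
        (fun i => (PySem.List.pyRange (x - PySem.Int.mod x 3) (x - PySem.Int.mod x 3 + 3) 1).map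
          (fun j => pvCell b i j))
    ++ (if y == x then (PySem.List.pyRange 0 9 1).map (fun i => pvCell b i i) else [])
    ++ (if y + x == 8 then (PySem.List.pyRange 0 9 1).map (fun i => pvCell b i (8 - i)) else [])

set_option maxHeartbeats 1000000 in
theorem valid_eq {b : List (List Int)} {n r c : Int} (hb : pvIs9x9 b)
    (hr0 : 0 ≤ r) (hr9 : r < 9) (hc0 : 0 ≤ c) (hc9 : c < 9)
    (h0 : pvCell b r c = 0) (hn : 1 ≤ n) :
    isValid b n r c = !((pvPeers b r c).contains n) := by
  have hfr : PySem.Int.floordiv r 3 * 3 = r - PySem.Int.mod r 3 := by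
    have := PySem.Int.floordiv_mul_add_mod r 3; omega
  have hfc : PySem.Int.floordiv c 3 * 3 = c - PySem.Int.mod c 3 := by
    have := PySem.Int.floordiv_mul_add_mod c 3; omega
  have hnz : n ≠ 0 := by omega
  have Hrow : (∀ x ∈ PySem.List.pyRange 0 (9 : Int), ¬(pvCell b r x = n ∧ ¬c = x)) ↔
      ¬ n ∈ PySem.List.pyGetD b r [] := by
    rw [mem_row_iff hb hr0 hr9]
    constructor
    · rintro h ⟨i, ⟨h1, h2⟩, he⟩
      by_cases hci : c = i
      · exact hnz (by rw [← he, ← hci, h0])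
      · exact h i (PySem.List.mem_pyRange_one.mpr ⟨h1, h2⟩) ⟨he, hci⟩
    · rintro h x hx ⟨he, _⟩
      obtain ⟨h1, h2⟩ := PySem.List.mem_pyRange_one.mp hx
      exact h ⟨x, ⟨h1, h2⟩, he⟩
  have Hcol : (∀ x ∈ PySem.List.pyRange 0 (9 : Int), ¬(pvCell b x c = n ∧ ¬r = x)) ↔
      ¬ n ∈ List.map (fun i => pvCell b i c) (PySem.List.pyRange 0 9) := by
    constructor
    · rintro h hmem
      obtain ⟨i, hi, he⟩ := List.mem_map.mp hmem
      by_cases hri : r = i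
      · exact hnz (by rw [← he, ← hri, h0])
      · exact h i hi ⟨he, hri⟩
    · rintro h x hx ⟨he, _⟩
      exact h (List.mem_map.mpr ⟨x, hx, he⟩)
  have Hbox : (∀ x ∈ PySem.List.pyRange (r - PySem.Int.mod r 3) (r - PySem.Int.mod r 3 + 3),
        ¬∃ x1 ∈ PySem.List.pyRange (c - PySem.Int.mod c 3) (c - PySem.Int.mod c 3 + 3),
          pvCell b x x1 = n ∧ ¬(x, x1) = (r, c)) ↔
      ¬ n ∈ List.flatMap (fun i => List.map (fun j => pvCell b i j)
          (PySem.List.pyRange (c - PySem.Int.mod c 3) (c - PySem.Int.mod c 3 + 3)))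
        (PySem.List.pyRange (r - PySem.Int.mod r 3) (r - PySem.Int.mod r 3 + 3)) := by
    simp only [List.mem_flatMap, List.mem_map]
    constructor
    · rintro h ⟨i, hi, j, hj, he⟩
      by_cases hij : (i, j) = (r, c)
      · obtain ⟨rfl, rfl⟩ := Prod.mk.injEq .. ▸ Prod.ext_iff.mp hij
        exact hnz (by rw [← he, h0])
      · exact h i hi ⟨j, hj, he, hij⟩
    · rintro h x hx ⟨j, hj, he, _⟩
      exact h ⟨x, hx, j, hj, he⟩
  have Hd1 : ((r, c) ∉ pvLtr ∨ ∀ x ∈ PySem.List.pyRange 0 ((pvLtr.length : Nat) : Int),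
        ¬(pvCell b (PySem.List.pyGetD pvLtr x (0, 0)).1 (PySem.List.pyGetD pvLtr x (0, 0)).2 = n ∧
            ¬(r, c) = PySem.List.pyGetD pvLtr x (0, 0))) ↔
      ¬ n ∈ (if r = c then List.map (fun i => pvCell b i i) (PySem.List.pyRange 0 9) else []) := by
    have hlen : ((pvLtr.length : Nat) : Int) = 9 := by norm_num [pvLtr]
    rw [hlen, mem_ltr_iff hr0 hr9]
    by_cases hrc : r = c
    · subst hrc
      rw [if_pos rfl]
      simp only [not_true, false_or, List.mem_map]
      constructor
      · rintro h ⟨i, hi, he⟩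
        obtain ⟨h1, h2⟩ := PySem.List.mem_pyRange_one.mp hi
        by_cases hri : (r, r) = (i, i)
        · have h1' : r = i := (Prod.ext_iff.mp hri).1
          rw [← h1'] at he
          exact hnz (by rw [← he]; exact h0)
        · exact absurd (by rw [ltr_get i h1 h2]; exact ⟨he, hri⟩) (h i hi)
      · rintro h x hx hcon
        obtain ⟨h1, h2⟩ := PySem.List.mem_pyRange_one.mp hx
        rw [ltr_get x h1 h2] at hcon
        exact h ⟨x, hx, hcon.1⟩
    · rw [if_neg hrc]
      simp [hrc]
  have Hd2 : ((r, c) ∉ pvRtl ∨ ∀ x ∈ PySem.List.pyRange 0 ((pvRtl.length : Nat) : Int),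
        ¬(pvCell b (PySem.List.pyGetD pvRtl x (0, 0)).1 (PySem.List.pyGetD pvRtl x (0, 0)).2 = n ∧
            ¬(r, c) = PySem.List.pyGetD pvRtl x (0, 0))) ↔
      ¬ n ∈ (if r + c = 8 then List.map (fun i => pvCell b i (8 - i)) (PySem.List.pyRange 0 9) else []) := by
    have hlen : ((pvRtl.length : Nat) : Int) = 9 := by norm_num [pvRtl]
    rw [hlen, mem_rtl_iff hr0 hr9]
    by_cases hrc : r + c = 8
    · rw [if_pos hrc]
      simp only [hrc, not_true, false_or, List.mem_map]
      constructor
      · rintro h ⟨i, hi, he⟩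
        obtain ⟨h1, h2⟩ := PySem.List.mem_pyRange_one.mp hi
        by_cases hri : (r, c) = (i, 8 - i)
        · have h1' : r = i := (Prod.ext_iff.mp hri).1
          have h2' : c = 8 - i := (Prod.ext_iff.mp hri).2
          rw [← h2', ← h1'] at he
          exact hnz (by rw [← he]; exact h0)
        · exact absurd (by rw [rtl_get i h1 h2]; exact ⟨he, hri⟩) (h i hi)
      · rintro h x hx hcon
        obtain ⟨h1, h2⟩ := PySem.List.mem_pyRange_one.mp hx
        rw [rtl_get x h1 h2] at hcon
        exact h ⟨x, hx, hcon.1⟩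
    · rw [if_neg hrc]
      simp [hrc]
  apply Bool.coe_iff_coe.mp
  simp only [isValid, pvPeers, hb.1, pvRow_len (y := 0) hb (by norm_num) (by norm_num),
    hfr, hfc, Nat.cast_ofNat, Bool.and_eq_true, Bool.not_eq_eq_eq_not, Bool.not_true,
    List.any_eq_false, List.any_eq_true, List.contains_eq_mem, List.mem_append,
    Bool.and_eq_false_iff, beq_iff_eq, beq_eq_false_iff_ne, ne_eq,
    decide_eq_false_iff_not]
  rw [Hrow, Hcol, Hbox, Hd1, Hd2]
  tauto

-- ----- invariants tying B's blocking sets to the board -----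

def InvRows (b : List (List Int)) (rows : List (PySem.Set Int)) : Prop :=
  rows.length = 9 ∧ ∀ y : Int, 0 ≤ y → y < 9 → ∀ v : Int,
    (v ∈ pvSetAt rows y ↔ v ≠ 0 ∧ ∃ x : Int, (0 ≤ x ∧ x < 9) ∧ pvCell b y x = v)

def InvCols (b : List (List Int)) (cols : List (PySem.Set Int)) : Prop :=
  cols.length = 9 ∧ ∀ x : Int, 0 ≤ x → x < 9 → ∀ v : Int,
    (v ∈ pvSetAt cols x ↔ v ≠ 0 ∧ ∃ y : Int, (0 ≤ y ∧ y < 9) ∧ pvCell b y x = v)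

def InvBoxes (b : List (List Int)) (boxes : List (PySem.Set Int)) : Prop :=
  boxes.length = 9 ∧ ∀ bi : Int, 0 ≤ bi → bi < 9 → ∀ v : Int,
    (v ∈ pvSetAt boxes bi ↔ v ≠ 0 ∧ ∃ i j : Int, (0 ≤ i ∧ i < 9 ∧ 0 ≤ j ∧ j < 9 ∧
      3 * (i / 3) + j / 3 = bi) ∧ pvCell b i j = v)

def InvD1 (b : List (List Int)) (d1 : PySem.Set Int) : Prop :=
  ∀ v : Int, (v ∈ d1 ↔ v ≠ 0 ∧ ∃ i : Int, (0 ≤ i ∧ i < 9) ∧ pvCell b i i = v)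

def InvD2 (b : List (List Int)) (d2 : PySem.Set Int) : Prop :=
  ∀ v : Int, (v ∈ d2 ↔ v ≠ 0 ∧ ∃ i : Int, (0 ≤ i ∧ i < 9) ∧ pvCell b i (8 - i) = v)

theorem floordiv3_eq (y : Int) : PySem.Int.floordiv y 3 = y / 3 :=
  PySem.Int.floordiv_eq_ediv_of_pos (by norm_num)

theorem mod3_eq (y : Int) : PySem.Int.mod y 3 = y % 3 :=
  PySem.Int.mod_eq_emod_of_pos (by norm_num)

theorem pvSetAt_eq_getD {ms : List (PySem.Set Int)} {y : Int} (hy0 : 0 ≤ y) :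
    pvSetAt ms y = ms.getD y.toNat PySem.Set.empty := by
  unfold pvSetAt
  exact PySem.List.pyGetD_of_nonneg ms _ hy0

theorem pvSetAt_setD {ms : List (PySem.Set Int)} {r y : Int} (s : PySem.Set Int)
    (hlen : ms.length = 9) (hr0 : 0 ≤ r) (hr9 : r < 9) (hy0 : 0 ≤ y) (hy9 : y < 9) :
    pvSetAt (PySem.List.pySetD ms r s) y = if y = r then s else pvSetAt ms y := by
  rw [pvSetAt_eq_getD hy0, PySem.List.pySetD_of_nonneg _ _ hr0,
    List.getD_eq_getElem?_getD, List.getElem?_set]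
  by_cases h : y = r
  · subst h; simp [show y.toNat < ms.length by omega]
  · rw [if_neg (by omega), if_neg h, pvSetAt_eq_getD hy0, List.getD_eq_getElem?_getD]

-- membership after rows[r].add(v)
theorem pvSetAt_maskAdd {ms : List (PySem.Set Int)} {r y v w : Int}
    (hlen : ms.length = 9) (hr0 : 0 ≤ r) (hr9 : r < 9) (hy0 : 0 ≤ y) (hy9 : y < 9) :
    (w ∈ pvSetAt (pvMaskAdd ms r v) y ↔ (w ∈ pvSetAt ms y ∨ (y = r ∧ w = v))) := by
  unfold pvMaskAdd
  rw [pvSetAt_setD _ hlen hr0 hr9 hy0 hy9]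
  by_cases h : y = r
  · subst h
    rw [if_pos rfl, PySem.Set.mem_add]
    tauto
  · rw [if_neg h]
    tauto

theorem maskAdd_length {ms : List (PySem.Set Int)} {r v : Int} (hr0 : 0 ≤ r) :
    (pvMaskAdd ms r v).length = ms.length := by
  unfold pvMaskAdd
  rw [PySem.List.pySetD_of_nonneg _ _ hr0, List.length_set]

-- add then discard restores the set when the element was absent
theorem discard_add_cancel {s : PySem.Set Int} {v : Int} (h : v ∉ s) :
    PySem.Set.discard (PySem.Set.add s v) v = s := by
  rw [PySem.Set.add_of_not_mem h]
  show List.filter _ _ = s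
  rw [List.filter_append]
  have h1 : s.filter (fun y => !(y == v)) = s :=
    List.filter_eq_self.mpr (fun a ha => by
      have hav : a ≠ v := fun he => h (he ▸ ha)
      simp [hav])
  have h2 : [v].filter (fun y => !(y == v)) = [] := by simp
  rw [h1, h2, List.append_nil]

theorem maskDel_maskAdd {ms : List (PySem.Set Int)} {r v : Int}
    (hlen : ms.length = 9) (hr0 : 0 ≤ r) (hr9 : r < 9) (hv : v ∉ pvSetAt ms r) :
    pvMaskDel (pvMaskAdd ms r v) r v = ms := by
  have hlt : r.toNat < ms.length := by omega
  unfold pvMaskDel pvMaskAdd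
  rw [pvSetAt_setD (ms := ms) (s := PySem.Set.add (pvSetAt ms r) v) hlen hr0 hr9 hr0 hr9,
    if_pos rfl, discard_add_cancel hv]
  rw [PySem.List.pySetD_of_nonneg _ _ hr0, PySem.List.pySetD_of_nonneg _ _ hr0,
    List.set_set]
  have hs : pvSetAt ms r = ms[r.toNat]'hlt := by
    rw [pvSetAt_eq_getD hr0, List.getD_eq_getElem _ _ hlt]
  rw [hs, List.set_getElem_self]

-- ----- initial sets satisfy the invariants -----

theorem invRows_init {b : List (List Int)} : InvRows b (pvRowsInit b) := by
  constructor
  · unfold pvRowsInit; rw [List.length_map]; decide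
  · intro y hy0 hy9 v
    unfold pvSetAt pvRowsInit
    rw [PySem.List.pyGetD_map_pyRange_of_nonneg _ 9 y _ hy0 hy9]
    simp only [PySem.Set.mem_ofList, List.mem_map, List.mem_filter,
      PySem.List.mem_pyRange_one, Bool.not_eq_true', beq_eq_false_iff_ne, ne_eq]
    constructor
    · rintro ⟨x, ⟨⟨hx0, hx9⟩, hnz⟩, rfl⟩
      exact ⟨hnz, x, ⟨hx0, hx9⟩, rfl⟩
    · rintro ⟨hnz, x, ⟨hx0, hx9⟩, rfl⟩
      exact ⟨x, ⟨⟨hx0, hx9⟩, hnz⟩, rfl⟩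

theorem invCols_init {b : List (List Int)} : InvCols b (pvColsInit b) := by
  constructor
  · unfold pvColsInit; rw [List.length_map]; decide
  · intro x hx0 hx9 v
    unfold pvSetAt pvColsInit
    rw [PySem.List.pyGetD_map_pyRange_of_nonneg _ 9 x _ hx0 hx9]
    simp only [PySem.Set.mem_ofList, List.mem_map, List.mem_filter,
      PySem.List.mem_pyRange_one, Bool.not_eq_true', beq_eq_false_iff_ne, ne_eq]
    constructor
    · rintro ⟨y, ⟨⟨hy0, hy9⟩, hnz⟩, rfl⟩
      exact ⟨hnz, y, ⟨hy0, hy9⟩, rfl⟩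
    · rintro ⟨hnz, y, ⟨hy0, hy9⟩, rfl⟩
      exact ⟨y, ⟨⟨hy0, hy9⟩, hnz⟩, rfl⟩

theorem invBoxes_init {b : List (List Int)} : InvBoxes b (pvBoxesInit b) := by
  constructor
  · unfold pvBoxesInit; rw [List.length_map]; decide
  · intro bi h0 h9 v
    unfold pvSetAt pvBoxesInit
    rw [PySem.List.pyGetD_map_pyRange_of_nonneg _ 9 bi _ h0 h9]
    rw [floordiv3_eq, mod3_eq]
    simp only [PySem.Set.mem_ofList, List.mem_map, List.mem_filter, List.mem_flatMap,
      PySem.List.mem_pyRange_one, Bool.not_eq_true', beq_eq_false_iff_ne, ne_eq]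
    constructor
    · rintro ⟨p, ⟨⟨i, ⟨hi0, hi3⟩, hp⟩, hnz⟩, rfl⟩
      obtain ⟨j, ⟨hj0, hj3⟩, rfl⟩ := hp
      refine ⟨hnz, 3 * (bi / 3) + i, 3 * (bi % 3) + j, ⟨by omega, by omega, by omega,
        by omega, by omega⟩, rfl⟩
    · rintro ⟨hnz, i, j, ⟨hi0, hi9, hj0, hj9, hbi⟩, rfl⟩
      refine ⟨(i, j), ⟨⟨i - 3 * (bi / 3), ⟨by omega, by omega⟩,
        j - 3 * (bi % 3), ⟨by omega, by omega⟩, by rw [Prod.ext_iff]; constructor <;>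
          (show _ = _; omega)⟩, hnz⟩, rfl⟩

theorem invD1_init {b : List (List Int)} : InvD1 b (pvD1Init b) := by
  intro v
  unfold pvD1Init
  simp only [PySem.Set.mem_ofList, List.mem_map, List.mem_filter,
    PySem.List.mem_pyRange_one, Bool.not_eq_true', beq_eq_false_iff_ne, ne_eq]
  constructor
  · rintro ⟨i, ⟨⟨hi0, hi9⟩, hnz⟩, rfl⟩
    exact ⟨hnz, i, ⟨hi0, hi9⟩, rfl⟩
  · rintro ⟨hnz, i, ⟨hi0, hi9⟩, rfl⟩
    exact ⟨i, ⟨⟨hi0, hi9⟩, hnz⟩, rfl⟩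

theorem invD2_init {b : List (List Int)} : InvD2 b (pvD2Init b) := by
  intro v
  unfold pvD2Init
  simp only [PySem.Set.mem_ofList, List.mem_map, List.mem_filter,
    PySem.List.mem_pyRange_one, Bool.not_eq_true', beq_eq_false_iff_ne, ne_eq]
  constructor
  · rintro ⟨i, ⟨⟨hi0, hi9⟩, hnz⟩, rfl⟩
    exact ⟨hnz, i, ⟨hi0, hi9⟩, rfl⟩
  · rintro ⟨hnz, i, ⟨hi0, hi9⟩, rfl⟩
    exact ⟨i, ⟨⟨hi0, hi9⟩, hnz⟩, rfl⟩

-- ----- the B-side check equals membership in pvPeers -----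

set_option maxHeartbeats 1000000 in
theorem check_eq_peers {b : List (List Int)} {rows cols boxes : List (PySem.Set Int)}
    {d1 d2 : PySem.Set Int} {r c v : Int} (hb : pvIs9x9 b)
    (hR : InvRows b rows) (hC : InvCols b cols) (hX : InvBoxes b boxes)
    (h1 : InvD1 b d1) (h2 : InvD2 b d2)
    (hr0 : 0 ≤ r) (hr9 : r < 9) (hc0 : 0 ≤ c) (hc9 : c < 9) (hv : 1 ≤ v) :
    ((pvSetAt rows r).contains v || (pvSetAt cols c).contains v ||
      (pvSetAt boxes (3 * PySem.Int.floordiv r 3 + PySem.Int.floordiv c 3)).contains v ||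
      (r == c && d1.contains v) || (r + c == 8 && d2.contains v))
    = (pvPeers b r c).contains v := by
  have hnz : v ≠ 0 := by omega
  have hbi0 : (0 : Int) ≤ 3 * (r / 3) + c / 3 := by omega
  have hbi9 : 3 * (r / 3) + c / 3 < 9 := by omega
  apply Bool.coe_iff_coe.mp
  simp only [Bool.or_eq_true, Bool.and_eq_true, beq_iff_eq, PySem.Set.contains_iff,
    List.contains_eq_mem, decide_eq_true_eq, floordiv3_eq]
  rw [hR.2 r hr0 hr9 v, hC.2 c hc0 hc9 v, hX.2 _ hbi0 hbi9 v, h1 v, h2 v]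
  simp only [pvPeers, List.mem_append, List.mem_map, List.mem_flatMap,
    PySem.List.mem_pyRange_one, mod3_eq, beq_iff_eq]
  have Hrow : (v ≠ 0 ∧ ∃ x : Int, (0 ≤ x ∧ x < 9) ∧ pvCell b r x = v) ↔
      v ∈ PySem.List.pyGetD b r [] := by
    rw [mem_row_iff hb hr0 hr9]
    constructor
    · rintro ⟨_, x, hx, he⟩; exact ⟨x, hx, he⟩
    · rintro ⟨x, hx, he⟩; exact ⟨hnz, x, hx, he⟩
  have Hcol : (v ≠ 0 ∧ ∃ y : Int, (0 ≤ y ∧ y < 9) ∧ pvCell b y c = v) ↔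
      (∃ y : Int, (0 ≤ y ∧ y < 9) ∧ pvCell b y c = v) := by
    constructor
    · rintro ⟨_, h⟩; exact h
    · intro h; exact ⟨hnz, h⟩
  have Hbox : (v ≠ 0 ∧ ∃ i j : Int, (0 ≤ i ∧ i < 9 ∧ 0 ≤ j ∧ j < 9 ∧
        3 * (i / 3) + j / 3 = 3 * (r / 3) + c / 3) ∧ pvCell b i j = v) ↔
      (∃ i : Int, (r - r % 3 ≤ i ∧ i < r - r % 3 + 3) ∧
        ∃ j : Int, (c - c % 3 ≤ j ∧ j < c - c % 3 + 3) ∧ pvCell b i j = v) := by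
    constructor
    · rintro ⟨_, i, j, ⟨hi0, hi9, hj0, hj9, he⟩, hc'⟩
      exact ⟨i, ⟨by omega, by omega⟩, j, ⟨by omega, by omega⟩, hc'⟩
    · rintro ⟨i, ⟨hi1, hi2⟩, j, ⟨hj1, hj2⟩, hc'⟩
      exact ⟨hnz, i, j, ⟨by omega, by omega, by omega, by omega, by omega⟩, hc'⟩
  have Hd1 : (r = c ∧ (v ≠ 0 ∧ ∃ i : Int, (0 ≤ i ∧ i < 9) ∧ pvCell b i i = v)) ↔
      v ∈ (if r = c then List.map (fun i => pvCell b i i) (PySem.List.pyRange 0 9) else []) := by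
    by_cases hrc : r = c
    · rw [if_pos hrc]
      constructor
      · rintro ⟨_, _, i, hi, he⟩
        exact List.mem_map.mpr ⟨i, PySem.List.mem_pyRange_one.mpr hi, he⟩
      · intro hm
        obtain ⟨i, hi, he⟩ := List.mem_map.mp hm
        exact ⟨hrc, hnz, i, PySem.List.mem_pyRange_one.mp hi, he⟩
    · rw [if_neg hrc]; simp [hrc]
  have Hd2 : (r + c = 8 ∧ (v ≠ 0 ∧ ∃ i : Int, (0 ≤ i ∧ i < 9) ∧ pvCell b i (8 - i) = v)) ↔
      v ∈ (if r + c = 8 then List.map (fun i => pvCell b i (8 - i)) (PySem.List.pyRange 0 9) else []) := by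
    by_cases hrc : r + c = 8
    · rw [if_pos hrc]
      constructor
      · rintro ⟨_, _, i, hi, he⟩
        exact List.mem_map.mpr ⟨i, PySem.List.mem_pyRange_one.mpr hi, he⟩
      · intro hm
        obtain ⟨i, hi, he⟩ := List.mem_map.mp hm
        exact ⟨hrc, hnz, i, PySem.List.mem_pyRange_one.mp hi, he⟩
    · rw [if_neg hrc]; simp [hrc]
  rw [← Hrow, ← Hd1, ← Hd2]
  constructor
  · rintro ((((h | h) | h) | h) | h)
    · exact Or.inl (Or.inl (Or.inl (Or.inl h)))
    · exact Or.inl (Or.inl (Or.inl (Or.inr (Hcol.mp h))))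
    · exact Or.inl (Or.inl (Or.inr (Hbox.mp h)))
    · exact Or.inl (Or.inr h)
    · exact Or.inr h
  · rintro ((((h | h) | h) | h) | h)
    · exact Or.inl (Or.inl (Or.inl (Or.inl h)))
    · exact Or.inl (Or.inl (Or.inl (Or.inr (Hcol.mpr h))))
    · exact Or.inl (Or.inl (Or.inr (Hbox.mpr h)))
    · exact Or.inl (Or.inr h)
    · exact Or.inr h

-- ----- invariant preservation when placing v at (r, c) -----

theorem invRows_place {b : List (List Int)} {rows : List (PySem.Set Int)} {r c v : Int}
    (hb : pvIs9x9 b) (hR : InvRows b rows)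
    (hr0 : 0 ≤ r) (hr9 : r < 9) (hc0 : 0 ≤ c) (hc9 : c < 9)
    (h0 : pvCell b r c = 0) (hv : v ≠ 0) :
    InvRows (pvSet b r c v) (pvMaskAdd rows r v) := by
  refine ⟨by rw [maskAdd_length hr0]; exact hR.1, ?_⟩
  intro y hy0 hy9 w
  rw [pvSetAt_maskAdd hR.1 hr0 hr9 hy0 hy9, hR.2 y hy0 hy9 w]
  constructor
  · rintro (⟨hwnz, x, hx, he⟩ | ⟨rfl, rfl⟩)
    · refine ⟨hwnz, x, hx, ?_⟩
      rw [pvCell_pvSet hb hr0 hr9 hc0 hc9 hy0 hx.1]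
      rw [if_neg ?_]
      · exact he
      · rintro ⟨rfl, rfl⟩; exact hwnz (by rw [← he, h0])
    · refine ⟨hv, c, ⟨hc0, hc9⟩, ?_⟩
      rw [pvCell_pvSet hb hr0 hr9 hc0 hc9 hr0 hc0, if_pos ⟨rfl, rfl⟩]
  · rintro ⟨hwnz, x, hx, he⟩
    rw [pvCell_pvSet hb hr0 hr9 hc0 hc9 hy0 hx.1] at he
    by_cases hyx : y = r ∧ x = c
    · rw [if_pos hyx] at he
      exact Or.inr ⟨hyx.1, he.symm⟩
    · rw [if_neg hyx] at he
      exact Or.inl ⟨hwnz, x, hx, he⟩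

theorem invCols_place {b : List (List Int)} {cols : List (PySem.Set Int)} {r c v : Int}
    (hb : pvIs9x9 b) (hC : InvCols b cols)
    (hr0 : 0 ≤ r) (hr9 : r < 9) (hc0 : 0 ≤ c) (hc9 : c < 9)
    (h0 : pvCell b r c = 0) (hv : v ≠ 0) :
    InvCols (pvSet b r c v) (pvMaskAdd cols c v) := by
  refine ⟨by rw [maskAdd_length hc0]; exact hC.1, ?_⟩
  intro x hx0 hx9 w
  rw [pvSetAt_maskAdd hC.1 hc0 hc9 hx0 hx9, hC.2 x hx0 hx9 w]
  constructor
  · rintro (⟨hwnz, y, hy, he⟩ | ⟨rfl, rfl⟩)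
    · refine ⟨hwnz, y, hy, ?_⟩
      rw [pvCell_pvSet hb hr0 hr9 hc0 hc9 hy.1 hx0]
      rw [if_neg ?_]
      · exact he
      · rintro ⟨rfl, rfl⟩; exact hwnz (by rw [← he, h0])
    · refine ⟨hv, r, ⟨hr0, hr9⟩, ?_⟩
      rw [pvCell_pvSet hb hr0 hr9 hc0 hc9 hr0 hc0, if_pos ⟨rfl, rfl⟩]
  · rintro ⟨hwnz, y, hy, he⟩
    rw [pvCell_pvSet hb hr0 hr9 hc0 hc9 hy.1 hx0] at he
    by_cases hyx : y = r ∧ x = c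
    · rw [if_pos hyx] at he
      exact Or.inr ⟨hyx.2, he.symm⟩
    · rw [if_neg hyx] at he
      exact Or.inl ⟨hwnz, y, hy, he⟩

theorem invBoxes_place {b : List (List Int)} {boxes : List (PySem.Set Int)} {r c v : Int}
    (hb : pvIs9x9 b) (hX : InvBoxes b boxes)
    (hr0 : 0 ≤ r) (hr9 : r < 9) (hc0 : 0 ≤ c) (hc9 : c < 9)
    (h0 : pvCell b r c = 0) (hv : v ≠ 0) :
    InvBoxes (pvSet b r c v)
      (pvMaskAdd boxes (3 * PySem.Int.floordiv r 3 + PySem.Int.floordiv c 3) v) := by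
  have hbi0 : (0 : Int) ≤ 3 * PySem.Int.floordiv r 3 + PySem.Int.floordiv c 3 := by
    rw [floordiv3_eq, floordiv3_eq]; omega
  have hbi9 : 3 * PySem.Int.floordiv r 3 + PySem.Int.floordiv c 3 < 9 := by
    rw [floordiv3_eq, floordiv3_eq]; omega
  refine ⟨by rw [maskAdd_length hbi0]; exact hX.1, ?_⟩
  intro bi h0' h9' w
  rw [pvSetAt_maskAdd hX.1 hbi0 hbi9 h0' h9', hX.2 bi h0' h9' w]
  constructor
  · rintro (⟨hwnz, i, j, hij, he⟩ | ⟨rfl, rfl⟩)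
    · refine ⟨hwnz, i, j, hij, ?_⟩
      rw [pvCell_pvSet hb hr0 hr9 hc0 hc9 hij.1 hij.2.2.1]
      rw [if_neg ?_]
      · exact he
      · rintro ⟨rfl, rfl⟩; exact hwnz (by rw [← he, h0])
    · refine ⟨hv, r, c, ⟨hr0, hr9, hc0, hc9, by rw [floordiv3_eq, floordiv3_eq]⟩, ?_⟩
      rw [pvCell_pvSet hb hr0 hr9 hc0 hc9 hr0 hc0, if_pos ⟨rfl, rfl⟩]
  · rintro ⟨hwnz, i, j, hij, he⟩
    rw [pvCell_pvSet hb hr0 hr9 hc0 hc9 hij.1 hij.2.2.1] at he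
    by_cases hyx : i = r ∧ j = c
    · rw [if_pos hyx] at he
      refine Or.inr ⟨?_, he.symm⟩
      rw [floordiv3_eq, floordiv3_eq, ← hij.2.2.2.2, hyx.1, hyx.2]
    · rw [if_neg hyx] at he
      exact Or.inl ⟨hwnz, i, j, hij, he⟩

theorem invD1_place {b : List (List Int)} {d1 : PySem.Set Int} {r c v : Int}
    (hb : pvIs9x9 b) (h1 : InvD1 b d1)
    (hr0 : 0 ≤ r) (hr9 : r < 9) (hc0 : 0 ≤ c) (hc9 : c < 9)
    (h0 : pvCell b r c = 0) (hv : v ≠ 0) :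
    InvD1 (pvSet b r c v) (if (r == c) then PySem.Set.add d1 v else d1) := by
  intro w
  by_cases hrc : r = c
  · subst hrc
    rw [if_pos (by simp), PySem.Set.mem_add, h1 w]
    constructor
    · rintro (⟨hwnz, i, hi, he⟩ | rfl)
      · refine ⟨hwnz, i, hi, ?_⟩
        rw [pvCell_pvSet hb hr0 hr9 hr0 hr9 hi.1 hi.1, if_neg ?_]
        · exact he
        · rintro ⟨rfl, _⟩; exact hwnz (by rw [← he, h0])
      · refine ⟨hv, r, ⟨hr0, hr9⟩, ?_⟩
        rw [pvCell_pvSet hb hr0 hr9 hr0 hr9 hr0 hr0, if_pos ⟨rfl, rfl⟩]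
    · rintro ⟨hwnz, i, hi, he⟩
      rw [pvCell_pvSet hb hr0 hr9 hr0 hr9 hi.1 hi.1] at he
      by_cases hir : i = r ∧ i = r
      · rw [if_pos hir] at he
        exact Or.inr he.symm
      · rw [if_neg hir] at he
        exact Or.inl ⟨hwnz, i, hi, he⟩
  · rw [if_neg (by simp [hrc]), h1 w]
    constructor
    · rintro ⟨hwnz, i, hi, he⟩
      refine ⟨hwnz, i, hi, ?_⟩
      rw [pvCell_pvSet hb hr0 hr9 hc0 hc9 hi.1 hi.1, if_neg ?_]
      · exact he
      · rintro ⟨rfl, rfl⟩; exact hrc rfl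
    · rintro ⟨hwnz, i, hi, he⟩
      rw [pvCell_pvSet hb hr0 hr9 hc0 hc9 hi.1 hi.1] at he
      rw [if_neg (by rintro ⟨rfl, rfl⟩; exact hrc rfl)] at he
      exact ⟨hwnz, i, hi, he⟩

theorem invD2_place {b : List (List Int)} {d2 : PySem.Set Int} {r c v : Int}
    (hb : pvIs9x9 b) (h2 : InvD2 b d2)
    (hr0 : 0 ≤ r) (hr9 : r < 9) (hc0 : 0 ≤ c) (hc9 : c < 9)
    (h0 : pvCell b r c = 0) (hv : v ≠ 0) :
    InvD2 (pvSet b r c v) (if (r + c == 8) then PySem.Set.add d2 v else d2) := by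
  intro w
  by_cases hrc : r + c = 8
  · rw [if_pos (by simp [hrc]), PySem.Set.mem_add, h2 w]
    constructor
    · rintro (⟨hwnz, i, hi, he⟩ | rfl)
      · refine ⟨hwnz, i, hi, ?_⟩
        rw [pvCell_pvSet hb hr0 hr9 hc0 hc9 hi.1 (by omega), if_neg ?_]
        · exact he
        · rintro ⟨rfl, h8⟩; exact hwnz (by rw [← he, h8]; exact h0)
      · refine ⟨hv, r, ⟨hr0, hr9⟩, ?_⟩
        rw [show (8 : Int) - r = c by omega,
          pvCell_pvSet hb hr0 hr9 hc0 hc9 hr0 hc0, if_pos ⟨rfl, rfl⟩]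
    · rintro ⟨hwnz, i, hi, he⟩
      rw [pvCell_pvSet hb hr0 hr9 hc0 hc9 hi.1 (by omega)] at he
      by_cases hir : i = r ∧ 8 - i = c
      · rw [if_pos hir] at he
        exact Or.inr he.symm
      · rw [if_neg hir] at he
        exact Or.inl ⟨hwnz, i, hi, he⟩
  · rw [if_neg (by simp [hrc]), h2 w]
    constructor
    · rintro ⟨hwnz, i, hi, he⟩
      refine ⟨hwnz, i, hi, ?_⟩
      rw [pvCell_pvSet hb hr0 hr9 hc0 hc9 hi.1 (by omega), if_neg ?_]
      · exact he
      · rintro ⟨rfl, h8⟩; exact hrc (by omega)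
    · rintro ⟨hwnz, i, hi, he⟩
      rw [pvCell_pvSet hb hr0 hr9 hc0 hc9 hi.1 (by omega)] at he
      rw [if_neg (by rintro ⟨rfl, h8⟩; exact hrc (by omega))] at he
      exact ⟨hwnz, i, hi, he⟩

-- ----- main induction: A's fueled recursion equals B's set-driven recursion -----

set_option maxHeartbeats 1000000 in
theorem go_eq : ∀ (es : List (Int × Int)) (fuel : Nat) (b : List (List Int))
    (rows cols boxes : List (PySem.Set Int)) (d1 d2 : PySem.Set Int),
    pvIs9x9 b → pvEmpties b = es → es.length < fuel →
    InvRows b rows → InvCols b cols → InvBoxes b boxes → InvD1 b d1 → InvD2 b d2 →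
    solveFuel fuel b = goB b es rows cols boxes d1 d2 := by
  intro es
  induction es with
  | nil =>
    intro fuel b rows cols boxes d1 d2 hb he hf _ _ _ _ _
    obtain ⟨f, rfl⟩ : ∃ f, fuel = f + 1 := ⟨fuel - 1, by omega⟩
    have hfind : findEmpty b = none := by rw [findEmpty_eq hb, he]; rfl
    simp only [solveFuel.eq_def, goB.eq_def, hfind]
  | cons e rest ih =>
    intro fuel b rows cols boxes d1 d2 hb he hf hR hC hX h1 h2
    obtain ⟨r, c⟩ := e
    obtain ⟨f, rfl⟩ : ∃ f, fuel = f + 1 := ⟨fuel - 1, by omega⟩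
    have hf' : rest.length < f := by simp at hf; omega
    obtain ⟨hr0, hr9, hc0, hc9, h0⟩ := empties_head_facts hb he
    have hfind : findEmpty b = some (r, c) := by rw [findEmpty_eq hb, he]; rfl
    have hten : ((b.length : Int) + 1) = 10 := by rw [hb.1]; norm_num
    rw [show solveFuel (f + 1) b = tryA f b r c (PySem.List.pyRange 1 ((b.length : Int) + 1) 1) by
      simp only [solveFuel.eq_def, hfind]]
    rw [hten, show goB b ((r, c) :: rest) rows cols boxes d1 d2 =
        tryB b r c rest rows cols boxes d1 d2 (PySem.List.pyRange 1 10 1) from by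
      simp only [goB.eq_def]]
    have inner : ∀ ns : List Int, (∀ v ∈ ns, 1 ≤ v) →
        tryA f b r c ns = tryB b r c rest rows cols boxes d1 d2 ns := by
      intro ns
      induction ns with
      | nil => intro _; rw [tryA.eq_def, tryB.eq_def]
      | cons v vs ihn =>
        intro hvs
        have hv1 : 1 ≤ v := hvs v List.mem_cons_self
        have hvnz : v ≠ 0 := by omega
        rw [show tryA f b r c (v :: vs) =
            (if isValid b v r c then
              (if solveFuel f (pvSet b r c v) then true
               else tryA f (pvSet (pvSet b r c v) r c 0) r c vs)
             else tryA f b r c vs) from by conv_lhs => rw [tryA.eq_def]]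
        rw [show tryB b r c rest rows cols boxes d1 d2 (v :: vs) =
            (if ((pvSetAt rows r).contains v || (pvSetAt cols c).contains v ||
                  (pvSetAt boxes (3 * PySem.Int.floordiv r 3 + PySem.Int.floordiv c 3)).contains v ||
                  (r == c && d1.contains v) || (r + c == 8 && d2.contains v)) then
              tryB b r c rest rows cols boxes d1 d2 vs
             else
              (if goB (pvSet b r c v) rest (pvMaskAdd rows r v) (pvMaskAdd cols c v)
                    (pvMaskAdd boxes (3 * PySem.Int.floordiv r 3 + PySem.Int.floordiv c 3) v)
                    (if r == c then PySem.Set.add d1 v else d1)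
                    (if r + c == 8 then PySem.Set.add d2 v else d2) then true
               else
                tryB (pvSet (pvSet b r c v) r c 0) r c rest
                  (pvMaskDel (pvMaskAdd rows r v) r v) (pvMaskDel (pvMaskAdd cols c v) c v)
                  (pvMaskDel (pvMaskAdd boxes (3 * PySem.Int.floordiv r 3 + PySem.Int.floordiv c 3) v)
                    (3 * PySem.Int.floordiv r 3 + PySem.Int.floordiv c 3) v)
                  (if r == c then PySem.Set.discard (if r == c then PySem.Set.add d1 v else d1) v
                   else (if r == c then PySem.Set.add d1 v else d1))
                  (if r + c == 8 then PySem.Set.discard (if r + c == 8 then PySem.Set.add d2 v else d2) v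
                   else (if r + c == 8 then PySem.Set.add d2 v else d2)) vs)) from by
          conv_lhs => rw [tryB.eq_def]]
        have hcheck : isValid b v r c =
            !((pvSetAt rows r).contains v || (pvSetAt cols c).contains v ||
              (pvSetAt boxes (3 * PySem.Int.floordiv r 3 + PySem.Int.floordiv c 3)).contains v ||
              (r == c && d1.contains v) || (r + c == 8 && d2.contains v)) := by
          rw [valid_eq hb hr0 hr9 hc0 hc9 h0 hv1,
            check_eq_peers hb hR hC hX h1 h2 hr0 hr9 hc0 hc9 hv1]
        by_cases hc' : ((pvSetAt rows r).contains v || (pvSetAt cols c).contains v ||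
            (pvSetAt boxes (3 * PySem.Int.floordiv r 3 + PySem.Int.floordiv c 3)).contains v ||
            (r == c && d1.contains v) || (r + c == 8 && d2.contains v)) = true
        · rw [if_pos hc', if_neg (by rw [hcheck, hc']; simp)]
          exact ihn (fun w hw => hvs w (List.mem_cons_of_mem _ hw))
        · have hvalid : isValid b v r c = true := by
            rw [hcheck, Bool.not_eq_true']
            exact eq_false_of_ne_true hc'
          rw [if_neg hc', if_pos hvalid]
          have hb' : pvIs9x9 (pvSet b r c v) := pre_pvSet hb hr0 hr9
          have hbi0 : (0 : Int) ≤ 3 * PySem.Int.floordiv r 3 + PySem.Int.floordiv c 3 := by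
            rw [floordiv3_eq, floordiv3_eq]; omega
          have hbi9 : 3 * PySem.Int.floordiv r 3 + PySem.Int.floordiv c 3 < 9 := by
            rw [floordiv3_eq, floordiv3_eq]; omega
          have hnot := hc'
          simp only [Bool.or_eq_true, Bool.and_eq_true, beq_iff_eq,
            PySem.Set.contains_iff, not_or] at hnot
          have hnr : v ∉ pvSetAt rows r := by tauto
          have hnc : v ∉ pvSetAt cols c := by tauto
          have hnb : v ∉ pvSetAt boxes (3 * PySem.Int.floordiv r 3 + PySem.Int.floordiv c 3) := by
            tauto
          have hnd1 : r = c → v ∉ d1 := by tauto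
          have hnd2 : r + c = 8 → v ∉ d2 := by tauto
          have hrec := ih f (pvSet b r c v) (pvMaskAdd rows r v) (pvMaskAdd cols c v)
            (pvMaskAdd boxes (3 * PySem.Int.floordiv r 3 + PySem.Int.floordiv c 3) v)
            (if r == c then PySem.Set.add d1 v else d1)
            (if r + c == 8 then PySem.Set.add d2 v else d2)
            hb' (empties_pvSet hb he hvnz) hf'
            (invRows_place hb hR hr0 hr9 hc0 hc9 h0 hvnz)
            (invCols_place hb hC hr0 hr9 hc0 hc9 h0 hvnz)
            (invBoxes_place hb hX hr0 hr9 hc0 hc9 h0 hvnz)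
            (invD1_place hb h1 hr0 hr9 hc0 hc9 h0 hvnz)
            (invD2_place hb h2 hr0 hr9 hc0 hc9 h0 hvnz)
          rw [hrec]
          by_cases hgo : goB (pvSet b r c v) rest (pvMaskAdd rows r v) (pvMaskAdd cols c v)
              (pvMaskAdd boxes (3 * PySem.Int.floordiv r 3 + PySem.Int.floordiv c 3) v)
              (if r == c then PySem.Set.add d1 v else d1)
              (if r + c == 8 then PySem.Set.add d2 v else d2) = true
          · rw [if_pos hgo, if_pos hgo]
          · rw [if_neg hgo, if_neg hgo, pvRestore hb hr0 hr9 hc0 hc9 h0,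
              maskDel_maskAdd hR.1 hr0 hr9 hnr, maskDel_maskAdd hC.1 hc0 hc9 hnc,
              maskDel_maskAdd hX.1 hbi0 hbi9 hnb]
            have hd1eq : (if r == c then PySem.Set.discard (if r == c then PySem.Set.add d1 v else d1) v
                else (if r == c then PySem.Set.add d1 v else d1)) = d1 := by
              by_cases hrc : r = c
              · rw [if_pos (by simp [hrc]), if_pos (by simp [hrc]),
                  discard_add_cancel (hnd1 hrc)]
              · rw [if_neg (by simp [hrc]), if_neg (by simp [hrc])]
            have hd2eq : (if r + c == 8 then PySem.Set.discard (if r + c == 8 then PySem.Set.add d2 v else d2) v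
                else (if r + c == 8 then PySem.Set.add d2 v else d2)) = d2 := by
              by_cases hrc : r + c = 8
              · rw [if_pos (by simp [hrc]), if_pos (by simp [hrc]),
                  discard_add_cancel (hnd2 hrc)]
              · rw [if_neg (by simp [hrc]), if_neg (by simp [hrc])]
            rw [hd1eq, hd2eq]
            exact ihn (fun w hw => hvs w (List.mem_cons_of_mem _ hw))
    exact inner _ (fun v hv => (PySem.List.mem_pyRange_one.mp hv).1)

theorem empties_len_le {b : List (List Int)} (hb : pvIs9x9 b) : (pvEmpties b).length ≤ 81 := by
  rw [empties_eq_filter hb]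
  have h := List.length_filter_le (fun p => pvCell b p.1 p.2 == 0) pvAllPos
  rw [length_allPos] at h
  exact h

theorem pyGetD_zero_headD (b : List (List Int)) :
    PySem.List.pyGetD b 0 [] = b.headD [] := by
  cases b
  · rfl
  · rw [PySem.List.pyGetD_zero_cons]; rfl

theorem cell_ne_zero_of_noEmpty {b : List (List Int)} (h : pvNoEmpty b) {y x : Int}
    (hy : 0 ≤ y) (hy' : y < (b.length : Int)) (hx : 0 ≤ x)
    (hx' : x < ((PySem.List.pyGetD b 0 []).length : Int)) :
    (pvCell b y x == 0) = false := by
  have hylen : y.toNat < b.length := by omega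
  have hrow := h (b[y.toNat]'hylen) (List.getElem_mem _)
  rw [pyGetD_zero_headD] at hx'
  have hk := hrow.2 x.toNat (by omega)
  unfold pvCell
  rw [PySem.List.pyGetD_of_nonneg b [] hy, List.getD_eq_getElem _ _ hylen,
    PySem.List.pyGetD_of_nonneg _ 0 hx]
  have hxlen : x.toNat < (b[y.toNat]'hylen).length := by
    have := hrow.1; omega
  rw [List.getD_eq_getElem _ _ hxlen]
  simp only [beq_eq_false_iff_ne, ne_eq]
  rw [List.getD_eq_getElem _ _ hxlen] at hk
  exact hk

theorem findEmpty_none {b : List (List Int)} (h : pvNoEmpty b) : findEmpty b = none := by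
  unfold findEmpty
  rw [List.findSome?_eq_none_iff]
  intro y hy
  obtain ⟨hy0, hy1⟩ := PySem.List.mem_pyRange_one.mp hy
  rw [List.find?_eq_none.mpr, Option.map_none]
  intro x hx
  obtain ⟨hx0, hx1⟩ := PySem.List.mem_pyRange_one.mp hx
  simp [cell_ne_zero_of_noEmpty h hy0 hy1 hx0 hx1]

theorem empties_nil {b : List (List Int)} (h : pvNoEmpty b) : pvEmpties b = [] := by
  unfold pvEmpties
  rw [List.flatMap_eq_nil_iff]
  intro y hy
  obtain ⟨hy0, hy1⟩ := PySem.List.mem_pyRange_one.mp hy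
  rw [List.map_eq_nil_iff, List.filter_eq_nil_iff]
  intro x hx
  obtain ⟨hx0, hx1⟩ := PySem.List.mem_pyRange_one.mp hx
  simp [cell_ne_zero_of_noEmpty h hy0 hy1 hx0 hx1]


-- ===== VERDICT (by name: the statement is the Claim_ definition above) =====

theorem solve_spec : Claim_equal_solve := by
  intro board _ hpre
  unfold Spec_solve solve solve_alt
  rcases hpre with h9 | hne
  · by_cases hemp : (pvEmpties board).isEmpty
    · rw [if_pos hemp]
      rw [List.isEmpty_iff] at hemp
      simp only [solveFuel.eq_def, findEmpty_eq h9, hemp, List.head?_nil]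
    · rw [if_neg hemp]
      exact go_eq (pvEmpties board) 82 board _ _ _ _ _ h9 rfl
        (by have := empties_len_le h9; omega)
        invRows_init invCols_init invBoxes_init invD1_init invD2_init
  · rw [if_pos (by rw [empties_nil hne]; rfl)]
    simp only [solveFuel.eq_def, findEmpty_none hne]
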